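-- pv_equiv track=rewrite | github.com/celpegor216/ps | 프로그래머스/unrated/155652. 둘만의 암호/둘만의 암호.py | solution
-- ===== SOURCE A (Python) =====
-- def solution(s, skip, index):
--     answer = ''
--
--     for i in s:
--         cnt = 0
--         idx = 0
--         while cnt < index:
--             idx += 1
--             if chr((ord(i) - ord('a') + idx) % 26 + ord('a')) not in skip:
--                 cnt += 1
--         answer += chr((ord(i) - ord('a') + idx) % 26 + ord('a'))
--
--     return answer
-- ===== SOURCE B (Python) =====
-- def solution(s, skip, index):
--     skipset = set(skip)
--     out = []
--     for i in s:
--         b = (ord(i) - 97) % 26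
--         if index <= 0:
--             out.append(chr(b + 97))
--         else:
--             offs = [d for d in range(1, 27)
--                     if chr((b + d) % 26 + 97) not in skipset]
--             out.append(chr((b + offs[(index - 1) % len(offs)]) % 26 + 97))
--     return ''.join(out)
-- ===== Notes on version B (the rewrite author's own statement) =====
-- stated objective: faster
-- what changed: Per character, instead of stepping the index counter one candidate at a time (O(index) loop per char), B builds the 26-entry list of non-skipped cyclic offsets once per character and jumps directly to the answer with modular indexing offs[(index-1) % len(offs)].
import Mathlib
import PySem

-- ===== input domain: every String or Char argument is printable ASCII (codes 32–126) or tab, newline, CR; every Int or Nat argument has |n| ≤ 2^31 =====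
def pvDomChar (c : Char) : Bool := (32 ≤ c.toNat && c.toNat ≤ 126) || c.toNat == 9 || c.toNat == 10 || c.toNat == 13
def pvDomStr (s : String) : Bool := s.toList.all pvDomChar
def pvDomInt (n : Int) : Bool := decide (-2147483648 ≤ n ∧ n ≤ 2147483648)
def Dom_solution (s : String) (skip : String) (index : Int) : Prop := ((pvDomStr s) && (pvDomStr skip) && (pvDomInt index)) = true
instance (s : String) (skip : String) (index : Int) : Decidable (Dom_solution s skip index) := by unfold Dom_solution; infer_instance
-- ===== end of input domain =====

-- B replaces A's per-character counting loop (index iterations) by the 26-entry list of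
-- non-skipped cyclic offsets and a direct modular jump offs[(index-1) % len(offs)]: faster (asymptotic in index).

-- ===== PORT A =====
-- the while-loop of A, made total with a fuel counter (26*index iterations always suffice
-- on inputs where A terminates; the fuel guard only makes the loop total, it changes no result A produces)
def solLoopA (skip : List Char) (index : Int) (b : Int) : Nat → Int → Int → Int
  | 0, _, idx => idx
  | fuel+1, cnt, idx =>
    if cnt < index then
      if skip.contains (Char.ofNat (((b + (idx + 1)) % 26 + 97).toNat)) then
        solLoopA skip index b fuel cnt (idx + 1)
      else
        solLoopA skip index b fuel (cnt + 1) (idx + 1)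
    else idx

def solution (s : String) (skip : String) (index : Int) : String :=
  String.mk (s.toList.map (fun i =>
    let b : Int := ((i.toNat : Int) - 97) % 26
    let idx := solLoopA skip.toList index b (26 * index).toNat 0 0
    Char.ofNat (((b + idx) % 26 + 97).toNat)))

-- ===== PORT B =====
def solution_alt (s : String) (skip : String) (index : Int) : String :=
  let skipset : PySem.Set Char := PySem.Set.ofList skip.toList
  String.mk (s.toList.map (fun i =>
    let b : Int := ((i.toNat : Int) - 97) % 26
    if index ≤ 0 then Char.ofNat ((b + 97).toNat)
    else
      let offs := (PySem.List.pyRange 1 27 1).filter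
        (fun d => !(PySem.Set.contains skipset (Char.ofNat (((b + d) % 26 + 97).toNat))))
      Char.ofNat (((b + PySem.List.pyGetD offs ((index - 1) % (offs.length : Int)) 0) % 26 + 97).toNat)))

-- ===== PRECONDITION & SPEC =====
-- Pre_ excludes only the inputs on which A never returns (index > 0, s nonempty, and every
-- lowercase letter occurs in skip: A's while-loop then never finds a countable letter and diverges).
def Pre_solution (s : String) (skip : String) (index : Int) : Prop :=
  index ≤ 0 ∨ s.toList = [] ∨ ∃ p ∈ List.range 26, skip.toList.contains (Char.ofNat (p + 97)) = false
instance (s : String) (skip : String) (index : Int) : Decidable (Pre_solution s skip index) := by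
  unfold Pre_solution; infer_instance
def pvWitness_solution : String × String × Int := ("aukks", "wbqd", 5)
def Spec_solution (s : String) (skip : String) (index : Int) (out : String) : Prop := out = solution_alt s skip index
instance (s : String) (skip : String) (index : Int) (out : String) : Decidable (Spec_solution s skip index out) := by unfold Spec_solution; infer_instance

-- ===== CLAIM (what is proved, stated in full; the proofs are below) =====
def Claim_equal_solution : Prop := ∀ (s : String) (skip : String) (index : Int), Dom_solution s skip index → Pre_solution s skip index → Spec_solution s skip index (solution s skip index)

-- ===== LEMMAS AND PROOFS =====

-- the letter-test of both programs, as a predicate on the offset d from base b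
def pvP (skip : List Char) (b d : Int) : Bool :=
  !(skip.contains (Char.ofNat (((b + d) % 26 + 97).toNat)))

-- the window of allowed offsets in (idx, idx+26]
def pvCyc (skip : List Char) (b idx : Int) : List Int :=
  (PySem.List.pyRange (idx + 1) (idx + 27) 1).filter (pvP skip b)

def pvMid (skip : List Char) (b idx : Int) : List Int :=
  (PySem.List.pyRange (idx + 2) (idx + 27) 1).filter (pvP skip b)

theorem pvP_period (skip : List Char) (b d : Int) : pvP skip b (d + 26) = pvP skip b d := by
  unfold pvP
  rw [show (b + (d + 26)) % 26 = (b + d) % 26 by omega]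

theorem pvCyc_eq (skip : List Char) (b idx : Int) :
    pvCyc skip b idx = if pvP skip b (idx + 1) then (idx + 1) :: pvMid skip b idx else pvMid skip b idx := by
  unfold pvCyc pvMid
  rw [PySem.List.pyRange_one_cons (by omega), List.filter_cons]
  rw [show idx + 1 + 1 = idx + 2 by ring]

theorem pvCyc_succ (skip : List Char) (b idx : Int) :
    pvCyc skip b (idx + 1)
      = pvMid skip b idx ++ (if pvP skip b (idx + 1) then [idx + 27] else []) := by
  unfold pvCyc pvMid
  rw [show idx + 1 + 1 = idx + 2 by ring, show idx + 1 + 27 = (idx + 27) + 1 by ring]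
  rw [PySem.List.pyRange_one_succ_right (by omega), List.filter_append]
  have h27 : pvP skip b (idx + 27) = pvP skip b (idx + 1) := by
    rw [show idx + 27 = (idx + 1) + 26 by ring, pvP_period]
  simp only [List.filter_cons, List.filter_nil, h27]

theorem pvCyc_mem (skip : List Char) (b idx x : Int) (hx : x ∈ pvCyc skip b idx) :
    idx + 1 ≤ x ∧ x < idx + 27 ∧ pvP skip b x = true := by
  unfold pvCyc at hx
  rw [List.mem_filter, PySem.List.mem_pyRange_one] at hx
  exact ⟨hx.1.1, hx.1.2, hx.2⟩

theorem pvCyc_length_succ (skip : List Char) (b idx : Int) :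
    (pvCyc skip b (idx + 1)).length = (pvCyc skip b idx).length := by
  rw [pvCyc_succ, pvCyc_eq]
  cases pvP skip b (idx + 1) <;> simp

theorem pvCyc_length_nat (skip : List Char) (b : Int) (n : Nat) :
    (pvCyc skip b (n : Int)).length = (pvCyc skip b 0).length := by
  induction n with
  | zero => norm_num
  | succ k ih => rw [show ((k + 1 : Nat) : Int) = (k : Int) + 1 by push_cast; ring,
      pvCyc_length_succ, ih]

theorem pvCyc0_ne_nil (skip : List Char) (b : Int) (hb : 0 ≤ b) (hb' : b < 26)
    (hex : ∃ p ∈ List.range 26, skip.contains (Char.ofNat (p + 97)) = false) :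
    pvCyc skip b 0 ≠ [] := by
  obtain ⟨p, hp, hpc⟩ := hex
  rw [List.mem_range] at hp
  set d : Int := if 1 ≤ (p : Int) - b then (p : Int) - b else (p : Int) - b + 26 with hd
  have hd1 : 1 ≤ d ∧ d < 27 := by rw [hd]; split <;> omega
  have hmod : (b + d) % 26 = (p : Int) := by rw [hd]; split <;> omega
  have hPd : pvP skip b d = true := by
    unfold pvP
    rw [hmod, show ((p : Int) + 97).toNat = p + 97 by omega, hpc]
    rfl
  have hmem : d ∈ pvCyc skip b 0 := by
    unfold pvCyc
    rw [List.mem_filter, PySem.List.mem_pyRange_one]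
    exact ⟨⟨by omega, by omega⟩, hPd⟩
  exact List.ne_nil_of_mem hmem

theorem pvCyc_nat_ne_nil (skip : List Char) (b : Int) (hb : 0 ≤ b) (hb' : b < 26)
    (hex : ∃ p ∈ List.range 26, skip.contains (Char.ofNat (p + 97)) = false) (n : Nat) :
    pvCyc skip b (n : Int) ≠ [] := by
  have h0 := pvCyc0_ne_nil skip b hb hb' hex
  have := pvCyc_length_nat skip b n
  intro hnil
  rw [hnil] at this
  exact h0 (List.eq_nil_of_length_eq_zero this.symm)

theorem pvLoop_done (skip : List Char) (index b : Int) (fuel : Nat) (idx : Int) :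
    solLoopA skip index b fuel index idx = idx := by
  cases fuel <;> simp [solLoopA]

-- main loop invariant: with enough fuel, the A-loop with r counts remaining, started at idx,
-- ends (mod 26, shifted by b) at the ((r-1) mod m)-th element of the allowed window after idx
theorem pvMain (skip : List Char) (index b : Int) (hb : 0 ≤ b) (hb' : b < 26)
    (hex : ∃ p ∈ List.range 26, skip.contains (Char.ofNat (p + 97)) = false) :
    ∀ (fuel r idx : Nat), 1 ≤ r →
      ((pvCyc skip b (idx : Int)).headD 0 - (idx : Int)) + 26 * ((r : Int) - 1) ≤ (fuel : Int) →
      (b + solLoopA skip index b fuel (index - (r : Int)) (idx : Int)) % 26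
        = (b + (pvCyc skip b (idx : Int)).getD ((r - 1) % (pvCyc skip b (idx : Int)).length) 0) % 26 := by
  intro fuel
  induction fuel with
  | zero =>
      intro r idx hr hfuel
      exfalso
      obtain ⟨d0, t, hct⟩ := List.exists_cons_of_ne_nil (pvCyc_nat_ne_nil skip b hb hb' hex idx)
      have hm := pvCyc_mem skip b (idx : Int) d0 (by rw [hct]; exact List.mem_cons_self)
      rw [hct] at hfuel
      simp only [List.headD_cons] at hfuel
      omega
  | succ fuel ih =>
      intro r idx hr hfuel
      have hcond : index - (r : Int) < index := by omega
      obtain ⟨d0, t, hct⟩ := List.exists_cons_of_ne_nil (pvCyc_nat_ne_nil skip b hb hb' hex idx)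
      have hd0 := pvCyc_mem skip b (idx : Int) d0 (by rw [hct]; exact List.mem_cons_self)
      rw [hct] at hfuel; simp only [List.headD_cons] at hfuel
      cases hc : skip.contains (Char.ofNat (((b + ((idx : Int) + 1)) % 26 + 97)).toNat)
      · -- next candidate is allowed: the loop counts it
        have h : pvP skip b ((idx : Int) + 1) = true := by unfold pvP; rw [hc]; rfl
        rw [show solLoopA skip index b (fuel + 1) (index - (r : Int)) (idx : Int)
              = solLoopA skip index b fuel (index - (r : Int) + 1) ((idx : Int) + 1) by
            simp only [solLoopA]
            rw [if_pos hcond, if_neg (by simpa using hc)]]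
        -- the window at idx is (idx+1) :: pvMid, and its head is idx+1
        have hcy : pvCyc skip b (idx : Int) = ((idx : Int) + 1) :: pvMid skip b idx := by
          rw [pvCyc_eq, if_pos h]
        have hd0v : d0 = (idx : Int) + 1 := by
          rw [hcy] at hct; exact (List.cons_eq_cons.mp hct.symm).1
        rcases Nat.lt_or_ge r 2 with hr2 | hr2
        · -- r = 1 : this was the last count
          have hr1 : r = 1 := by omega
          subst hr1
          rw [show index - ((1 : Nat) : Int) + 1 = index by push_cast; ring, pvLoop_done]
          rw [hcy]
          simp
        · -- r ≥ 2 : recurse with one count fewer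
          -- fuel estimate for the recursive call
          obtain ⟨d1, t1, hct1⟩ :=
            List.exists_cons_of_ne_nil (pvCyc_nat_ne_nil skip b hb hb' hex (idx + 1))
          have hd1 := pvCyc_mem skip b ((idx + 1 : Nat) : Int) d1
            (by rw [hct1]; exact List.mem_cons_self)
          have hfuel1 : ((pvCyc skip b ((idx + 1 : Nat) : Int)).headD 0 - ((idx + 1 : Nat) : Int))
              + 26 * (((r - 1 : Nat) : Int) - 1) ≤ (fuel : Int) := by
            rw [hct1]; simp only [List.headD_cons]
            have hc1 : ((idx + 1 : Nat) : Int) = (idx : Int) + 1 := by push_cast; ring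
            have hc2 : ((r - 1 : Nat) : Int) = (r : Int) - 1 := by
              push_cast [Nat.cast_sub (by omega : 1 ≤ r)]; ring
            rw [hc1, hc2] at *
            omega
          have hih := ih (r - 1) (idx + 1) (by omega) hfuel1
          rw [show ((idx + 1 : Nat) : Int) = (idx : Int) + 1 by push_cast; ring,
              show (index - ((r - 1 : Nat) : Int)) = index - (r : Int) + 1 by
                push_cast [Nat.cast_sub (by omega : 1 ≤ r)]; ring] at hih
          rw [hih]
          -- transfer the window element across the rotation
          have hsucc : pvCyc skip b ((idx : Int) + 1)
              = pvMid skip b (idx : Int) ++ [(idx : Int) + 27] := by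
            rw [pvCyc_succ, if_pos h]
          set M := pvMid skip b (idx : Int) with hM
          rw [hsucc, hcy]
          rw [show (M ++ [(idx : Int) + 27]).length = M.length + 1 by simp,
              show (((idx : Int) + 1) :: M).length = M.length + 1 by simp]
          set m := M.length + 1 with hm
          have hrr : r - 1 - 1 = r - 2 := by omega
          rw [hrr]
          set j := (r - 2) % m with hj
          have hjlt : j < m := Nat.mod_lt _ (by omega)
          have hmod1 : (r - 1) % m = (j + 1) % m := by
            conv_lhs => rw [show r - 1 = (r - 2) + 1 by omega]
            rw [Nat.add_mod (r - 2) 1 m, ← hj, Nat.add_mod j (1 % m) m, Nat.mod_mod_of_dvd 1 dvd_rfl]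
            rw [← Nat.add_mod]
          rcases Nat.lt_or_ge (j + 1) m with hlt | hge
          · -- middle of the window
            have hje : (r - 1) % m = j + 1 := by rw [hmod1, Nat.mod_eq_of_lt hlt]
            rw [hje, List.getD_cons_succ, List.getD_append _ _ _ _ (by omega)]
          · -- wrap-around to the head of the window
            have hjm : j = M.length := by omega
            have hje : (r - 1) % m = 0 := by rw [hmod1, show j + 1 = m by omega, Nat.mod_self]
            rw [hje, List.getD_cons_zero, hjm,
              show (M ++ [(idx : Int) + 27]).getD M.length 0 = (idx : Int) + 27 by simp]
            omega
      · -- next candidate is skipped: the loop moves on without counting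
        have h : pvP skip b ((idx : Int) + 1) = false := by unfold pvP; rw [hc]; rfl
        rw [show solLoopA skip index b (fuel + 1) (index - (r : Int)) (idx : Int)
              = solLoopA skip index b fuel (index - (r : Int)) ((idx : Int) + 1) by
            simp only [solLoopA]
            rw [if_pos hcond, if_pos (by simpa using hc)]]
        have hsame : pvCyc skip b ((idx : Int) + 1) = pvCyc skip b (idx : Int) := by
          rw [pvCyc_succ, h, pvCyc_eq, h]
          simp
        have hd0ne : d0 ≠ (idx : Int) + 1 := by
          intro hcontr
          rw [hcontr] at hd0
          rw [hd0.2.2] at h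
          simp at h
        have hfuel1 : ((pvCyc skip b ((idx + 1 : Nat) : Int)).headD 0 - ((idx + 1 : Nat) : Int))
            + 26 * ((r : Int) - 1) ≤ (fuel : Int) := by
          rw [show ((idx + 1 : Nat) : Int) = (idx : Int) + 1 by push_cast; ring, hsame, hct]
          simp only [List.headD_cons]
          omega
        have hih := ih r (idx + 1) hr hfuel1
        rw [show ((idx + 1 : Nat) : Int) = (idx : Int) + 1 by push_cast; ring, hsame] at hih
        rw [hih]

-- the filter in B's port builds exactly the window pvCyc at idx = 0
theorem pvOffs_eq (skip : List Char) (b : Int) :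
    ((PySem.List.pyRange 1 27 1).filter
        (fun d => !(PySem.Set.contains (PySem.Set.ofList skip) (Char.ofNat (((b + d) % 26 + 97)).toNat))))
      = pvCyc skip b 0 := by
  unfold pvCyc
  rw [show (0 : Int) + 1 = 1 by ring, show (0 : Int) + 27 = 27 by ring]
  apply List.filter_congr
  intro x _
  unfold pvP
  congr 1
  rw [Bool.eq_iff_iff]
  simp [PySem.Set.mem_ofList]

-- per-character equality of the two ports
theorem pvChar_eq (skip : List Char) (index b : Int) (hb : 0 ≤ b) (hb' : b < 26)
    (hok : index ≤ 0 ∨ ∃ p ∈ List.range 26, skip.contains (Char.ofNat (p + 97)) = false) :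
    Char.ofNat (((b + solLoopA skip index b (26 * index).toNat 0 0) % 26 + 97)).toNat
      = (if index ≤ 0 then Char.ofNat ((b + 97).toNat)
         else
           Char.ofNat (((b + PySem.List.pyGetD
               ((PySem.List.pyRange 1 27 1).filter
                 (fun d => !(PySem.Set.contains (PySem.Set.ofList skip) (Char.ofNat (((b + d) % 26 + 97)).toNat))))
               ((index - 1) % ((((PySem.List.pyRange 1 27 1).filter
                 (fun d => !(PySem.Set.contains (PySem.Set.ofList skip) (Char.ofNat (((b + d) % 26 + 97)).toNat)))).length : Int)))
               0) % 26 + 97)).toNat) := by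
  by_cases hid : index ≤ 0
  · rw [if_pos hid, show (26 * index).toNat = 0 by omega,
      show solLoopA skip index b 0 0 0 = 0 from rfl]
    congr 1
    omega
  · rw [if_neg hid, pvOffs_eq]
    have hex := hok.resolve_left hid
    obtain ⟨d0, t, hct⟩ := List.exists_cons_of_ne_nil (pvCyc_nat_ne_nil skip b hb hb' hex 0)
    have hd0 := pvCyc_mem skip b ((0 : Nat) : Int) d0 (by rw [hct]; exact List.mem_cons_self)
    have hfuelb : ((pvCyc skip b ((0 : Nat) : Int)).headD 0 - ((0 : Nat) : Int))
        + 26 * ((index.toNat : Int) - 1) ≤ (((26 * index).toNat : Nat) : Int) := by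
      rw [hct]
      simp only [List.headD_cons]
      omega
    have hmain := pvMain skip index b hb hb' hex (26 * index).toNat index.toNat 0 (by omega) hfuelb
    rw [show (index - (index.toNat : Int)) = 0 by omega] at hmain
    simp only [Nat.cast_zero] at hmain
    have hm : 0 < (pvCyc skip b 0).length := by
      have := pvCyc_nat_ne_nil skip b hb hb' hex 0
      simp only [Nat.cast_zero] at this
      exact List.length_pos_iff.mpr this
    have hkey : (index - 1) % (((pvCyc skip b 0).length : Nat) : Int)
        = (((index.toNat - 1) % (pvCyc skip b 0).length : Nat) : Int) := by
      rw [show index - 1 = ((index.toNat - 1 : Nat) : Int) by omega]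
      norm_cast
    rw [hkey, PySem.List.pyGetD_natCast]
    rw [hmain]

-- ===== VERDICT (by name: the statement is the Claim_ definition above) =====
theorem solution_spec : Claim_equal_solution := by
  intro s skip index hdom hpre
  unfold Spec_solution solution solution_alt
  rcases hpre with hid | hnil | hex
  · congr 1
    apply List.map_congr_left
    intro i _
    dsimp only
    exact pvChar_eq skip.toList index _ (Int.emod_nonneg _ (by norm_num))
      (Int.emod_lt_of_pos _ (by norm_num)) (Or.inl hid)
  · rw [hnil]
    simp
  · congr 1
    apply List.map_congr_left
    intro i _
    dsimp only
    exact pvChar_eq skip.toList index _ (Int.emod_nonneg _ (by norm_num))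
      (Int.emod_lt_of_pos _ (by norm_num)) (Or.inr hex)
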